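-- pv_equiv track=rewrite | github.com/cadengraf/EECS590 | drone_rl/train_dqn.py | pick_position_by_distance
-- ===== SOURCE A (Python) =====
-- def pick_position_by_distance(candidates, min_dist, max_dist):
--     valid = [pos for pos, dist in candidates if min_dist <= dist <= max_dist]
--     if valid:
--         return valid[-1]
--     farther = [pos for pos, dist in candidates if dist >= min_dist]
--     if farther:
--         return farther[-1]
--     return candidates[-1][0]
-- ===== SOURCE B (Python) =====
-- def pick_position_by_distance(candidates, min_dist, max_dist):
--     farther_pos = None
--     for pos, dist in reversed(candidates):
--         if min_dist <= dist <= max_dist: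
--             return pos
--         if dist >= min_dist and farther_pos is None:
--             farther_pos = pos
--     if farther_pos is not None:
--         return farther_pos
--     return candidates[-1][0]
-- ===== Notes on version B (the rewrite author's own statement) =====
-- stated objective: alternative
-- what changed: Replaces A's three forward list-building scans (two comprehensions plus fallback) with a single reverse scan that early-exits on the first in-range candidate and remembers the first farther one.
import Mathlib
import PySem

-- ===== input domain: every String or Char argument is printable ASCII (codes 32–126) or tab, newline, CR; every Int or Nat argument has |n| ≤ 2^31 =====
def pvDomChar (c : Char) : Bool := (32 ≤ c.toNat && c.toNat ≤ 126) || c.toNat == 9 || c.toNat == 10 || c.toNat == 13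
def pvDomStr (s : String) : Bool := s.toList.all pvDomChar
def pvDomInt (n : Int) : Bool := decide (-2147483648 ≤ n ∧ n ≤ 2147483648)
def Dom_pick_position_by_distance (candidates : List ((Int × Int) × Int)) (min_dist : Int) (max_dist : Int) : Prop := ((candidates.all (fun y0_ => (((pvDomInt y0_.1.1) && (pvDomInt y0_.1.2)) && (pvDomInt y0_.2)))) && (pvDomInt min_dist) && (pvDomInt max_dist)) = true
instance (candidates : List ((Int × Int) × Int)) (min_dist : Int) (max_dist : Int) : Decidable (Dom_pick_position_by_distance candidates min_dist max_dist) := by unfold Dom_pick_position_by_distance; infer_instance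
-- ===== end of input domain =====

-- B replaces A's three forward list-building scans by one reverse scan with early exit (objective: alternative decomposition, same cost).

-- ===== PORT A =====
-- valid / farther are A's two list comprehensions; x[-1] via pyGet? (guarded by the nonemptiness tests, as in A).
def pick_position_by_distance (candidates : List ((Int × Int) × Int)) (min_dist : Int) (max_dist : Int) : Int × Int :=
  let valid := (candidates.filter (fun pd => (decide (min_dist ≤ pd.2) && decide (pd.2 ≤ max_dist)))).map Prod.fst
  if valid ≠ [] then (PySem.List.pyGet? valid (-1)).getD (0, 0)
  else
    let farther := (candidates.filter (fun pd => decide (min_dist ≤ pd.2))).map Prod.fst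
    if farther ≠ [] then (PySem.List.pyGet? farther (-1)).getD (0, 0)
    else ((PySem.List.pyGet? candidates (-1)).getD ((0, 0), 0)).1

-- ===== PORT B =====
-- the loop 'for pos, dist in reversed(candidates)': early exit = returning some pos; far = farther_pos.
def pickAltGo (min_dist max_dist : Int) : List ((Int × Int) × Int) → Option (Int × Int) → Option (Int × Int)
  | [], far => far
  | (pos, dist) :: rest, far =>
      if min_dist ≤ dist ∧ dist ≤ max_dist then some pos
      else pickAltGo min_dist max_dist rest (if min_dist ≤ dist ∧ far = none then some pos else far)

def pick_position_by_distance_alt (candidates : List ((Int × Int) × Int)) (min_dist : Int) (max_dist : Int) : Int × Int :=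
  match pickAltGo min_dist max_dist candidates.reverse none with
  | some p => p
  | none => ((PySem.List.pyGet? candidates (-1)).getD ((0, 0), 0)).1

-- ===== PRECONDITION & SPEC =====
-- Pre_ excludes only the empty list, on which Python A raises IndexError (candidates[-1]).
def Pre_pick_position_by_distance (candidates : List ((Int × Int) × Int)) (_min_dist : Int) (_max_dist : Int) : Prop := candidates ≠ []
instance (candidates : List ((Int × Int) × Int)) (min_dist : Int) (max_dist : Int) : Decidable (Pre_pick_position_by_distance candidates min_dist max_dist) := by unfold Pre_pick_position_by_distance; infer_instance
def pvWitness_pick_position_by_distance : (List ((Int × Int) × Int)) × Int × Int := ([((1, 2), 5), ((3, 4), 1)], 0, 3)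

def Spec_pick_position_by_distance (candidates : List ((Int × Int) × Int)) (min_dist : Int) (max_dist : Int) (out : Int × Int) : Prop := out = pick_position_by_distance_alt candidates min_dist max_dist
instance (candidates : List ((Int × Int) × Int)) (min_dist : Int) (max_dist : Int) (out : Int × Int) : Decidable (Spec_pick_position_by_distance candidates min_dist max_dist out) := by unfold Spec_pick_position_by_distance; infer_instance

-- ===== CLAIM (what is proved, stated in full; the proofs are below) =====
def Claim_equal_pick_position_by_distance : Prop := ∀ (candidates : List ((Int × Int) × Int)) (min_dist : Int) (max_dist : Int), Dom_pick_position_by_distance candidates min_dist max_dist → Pre_pick_position_by_distance candidates min_dist max_dist → Spec_pick_position_by_distance candidates min_dist max_dist (pick_position_by_distance candidates min_dist max_dist)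

-- ===== LEMMAS AND PROOFS =====

-- What the reverse loop computes: the first in-range pair of l wins; otherwise far, defaulting to the first farther pair.
theorem pickAltGo_spec (mn mx : Int) (l : List ((Int × Int) × Int)) (far : Option (Int × Int)) :
    pickAltGo mn mx l far =
      match l.find? (fun pd => decide (mn ≤ pd.2) && decide (pd.2 ≤ mx)) with
      | some pd => some pd.1
      | none => far.or ((l.find? (fun pd => decide (mn ≤ pd.2))).map Prod.fst) := by
  induction l generalizing far with
  | nil => simp [pickAltGo]
  | cons hd tl ih =>
    obtain ⟨pos, dist⟩ := hd
    by_cases h2 : mn ≤ dist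
    · by_cases h3 : dist ≤ mx
      · simp [pickAltGo, h2, h3]
      · cases far with
        | none => simp [pickAltGo, h2, h3, ih]
        | some r => simp [pickAltGo, h2, h3, ih]
    · simp [pickAltGo, h2, ih]

-- last element of a filtered list = first match in the reversed list
theorem getLast?_filter_rev {α : Type} (p : α → Bool) (l : List α) :
    (l.filter p).getLast? = l.reverse.find? p := by
  rw [List.getLast?_eq_head?_reverse, ← List.head?_filter, List.filter_reverse]

-- ===== VERDICT (by name: the statement is the Claim_ definition above) =====
theorem pick_position_by_distance_spec : Claim_equal_pick_position_by_distance := by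
  intro candidates mn mx _ _
  unfold Spec_pick_position_by_distance pick_position_by_distance pick_position_by_distance_alt
  rw [pickAltGo_spec]
  rcases hv : candidates.reverse.find? (fun pd => decide (mn ≤ pd.2) && decide (pd.2 ≤ mx)) with _ | pd
  · have e1 : (candidates.filter (fun pd => decide (mn ≤ pd.2) && decide (pd.2 ≤ mx))) = [] := by
      have h := getLast?_filter_rev (fun pd => decide (mn ≤ pd.2) && decide (pd.2 ≤ mx)) candidates
      rw [hv] at h
      simpa [List.getLast?_eq_none_iff] using h
    have hveq : (candidates.filter (fun pd => decide (mn ≤ pd.2) && decide (pd.2 ≤ mx))).map Prod.fst = [] := by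
      rw [e1, List.map_nil]
    rw [if_neg (not_not_intro hveq)]
    rcases hf : candidates.reverse.find? (fun pd => decide (mn ≤ pd.2)) with _ | qd
    · have e2 : (candidates.filter (fun pd => decide (mn ≤ pd.2))) = [] := by
        have h := getLast?_filter_rev (fun pd => decide (mn ≤ pd.2)) candidates
        rw [hf] at h
        simpa [List.getLast?_eq_none_iff] using h
      have hfeq : (candidates.filter (fun pd => decide (mn ≤ pd.2))).map Prod.fst = [] := by
        rw [e2, List.map_nil]
      rw [if_neg (not_not_intro hfeq), hv, hf]
      rfl
    · have e2 : (candidates.filter (fun pd => decide (mn ≤ pd.2))).getLast? = some qd := by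
        rw [getLast?_filter_rev, hf]
      have hne : (candidates.filter (fun pd => decide (mn ≤ pd.2))).map Prod.fst ≠ [] := by
        intro h
        rw [List.map_eq_nil_iff] at h
        rw [h] at e2
        simp at e2
      rw [if_pos hne, PySem.List.pyGet?_neg_one, List.getLast?_map, e2, hv, hf]
      rfl
  · have e1 : (candidates.filter (fun pd => decide (mn ≤ pd.2) && decide (pd.2 ≤ mx))).getLast? = some pd := by
      rw [getLast?_filter_rev, hv]
    have hne : (candidates.filter (fun pd => decide (mn ≤ pd.2) && decide (pd.2 ≤ mx))).map Prod.fst ≠ [] := by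
      intro h
      rw [List.map_eq_nil_iff] at h
      rw [h] at e1
      simp at e1
    rw [if_pos hne, PySem.List.pyGet?_neg_one, List.getLast?_map, e1, hv]
    rfl
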